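-- pv_equiv track=rewrite | github.com/jng0820/Algorithm_practice | programmers/hash_3.py | solution
-- ===== SOURCE A (Python) =====
-- def solution(clothes):
--     answer = 1
--
--     i_len = len(clothes)
--     arr = {}
--     for i in range(i_len):
--         if(not (clothes[i][len(clothes[i]) - 1] in arr)):
--             arr[clothes[i][len(clothes[i]) - 1]] = []
--         for j in range(len(clothes[i])-1):
--             arr[clothes[i][len(clothes[i])-1]].append(clothes[i][j])
--     for i in arr.keys():
--         answer *= len(arr[i])+1
--
--     return answer-1
-- ===== SOURCE B (Python) =====
-- def solution(clothes):
--     # Dict-free alternative: collect the distinct categories in first-appearance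
--     # order, then for each category scan the list once, summing the number of
--     # non-category fields contributed by each item of that category.
--     cats = []
--     for c in clothes:
--         if c[-1] not in cats:
--             cats.append(c[-1])
--     answer = 1
--     for cat in cats:
--         answer *= 1 + sum(len(c) - 1 for c in clothes if c[-1] == cat)
--     return answer - 1
-- ===== Notes on version B (the rewrite author's own statement) =====
-- stated objective: simpler
-- what changed: Replaces A's dict-of-lists accumulator (building every item's non-category fields into per-category lists and multiplying their lengths) with a dict-free first-occurrence category list plus one counting scan per category; nothing is stored per item, which also removes the per-item list-append overhead.
import Mathlib
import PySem

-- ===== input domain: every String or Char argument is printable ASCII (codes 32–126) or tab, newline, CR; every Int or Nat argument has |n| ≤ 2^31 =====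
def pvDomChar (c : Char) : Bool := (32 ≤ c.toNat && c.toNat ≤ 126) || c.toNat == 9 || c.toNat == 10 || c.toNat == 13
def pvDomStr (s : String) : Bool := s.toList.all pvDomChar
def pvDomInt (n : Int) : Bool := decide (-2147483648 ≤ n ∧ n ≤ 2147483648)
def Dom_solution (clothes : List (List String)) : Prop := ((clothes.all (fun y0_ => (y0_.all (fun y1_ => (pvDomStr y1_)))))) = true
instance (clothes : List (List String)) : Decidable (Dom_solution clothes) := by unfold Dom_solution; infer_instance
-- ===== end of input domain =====

-- B replaces A's dict-of-lists accumulator by a first-occurrence category list plus one counting scan per category (simpler, dict-free).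

-- ===== PORT A =====
-- A's outer-loop body (everything done for one clothes[i]), kept as a named helper of the port
def bodyRawA (arr : PySem.Dict String (List String)) (c : List String) : PySem.Dict String (List String) :=
  let k := PySem.List.pyGetD c ((c.length : Int) - 1) ""
  let arr := if arr.contains k then arr else arr.insert k []
  (PySem.List.pyRange 0 ((c.length : Int) - 1) 1).foldl
    (fun arr j => arr.modify k [] (fun ls => ls ++ [PySem.List.pyGetD c j ""])) arr

def solution (clothes : List (List String)) : Int :=
  let i_len := clothes.length
  let arr : PySem.Dict String (List String) :=
    (PySem.List.pyRange 0 (i_len : Int) 1).foldl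
      (fun arr i => bodyRawA arr (PySem.List.pyGetD clothes i [])) PySem.Dict.empty
  let answer : Int := arr.keys.foldl (fun answer k => answer * (((arr.getD k []).length : Int) + 1)) 1
  answer - 1

-- ===== PORT B =====
def solution_alt (clothes : List (List String)) : Int :=
  let cats : List String := clothes.foldl
    (fun cats c =>
      let k := PySem.List.pyGetD c (-1) ""
      if cats.contains k then cats else cats ++ [k]) []
  let answer : Int := cats.foldl
    (fun answer cat =>
      answer * (1 + clothes.foldl
        (fun s c => if PySem.List.pyGetD c (-1) "" = cat then s + ((c.length : Int) - 1) else s) 0)) 1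
  answer - 1

-- ===== PRECONDITION & SPEC =====
-- Pre_ excludes exactly the inputs containing an empty inner list: there Python A raises IndexError on clothes[i][len-1].
def Pre_solution (clothes : List (List String)) : Prop := ∀ c ∈ clothes, c ≠ []
instance (clothes : List (List String)) : Decidable (Pre_solution clothes) := by unfold Pre_solution; infer_instance
def pvWitness_solution : List (List String) := [["a", "hat"], ["b", "hat"], ["c", "top"]]
def Spec_solution (clothes : List (List String)) (out : Int) : Prop := out = solution_alt clothes
instance (clothes : List (List String)) (out : Int) : Decidable (Spec_solution clothes out) := by unfold Spec_solution; infer_instance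

-- ===== CLAIM (what is proved, stated in full; the proofs are below) =====
def Claim_equal_solution : Prop := ∀ (clothes : List (List String)), Dom_solution clothes → Pre_solution clothes → Spec_solution clothes (solution clothes)

-- ===== LEMMAS AND PROOFS =====

-- the category of an item (its last field), as a total function
def catOf (c : List String) : String := c.getLast?.getD ""

-- total non-category field count contributed by the items of category k
def catCount (l : List (List String)) (k : String) : Nat :=
  (l.map (fun c => if catOf c = k then c.length - 1 else 0)).sum

-- A's loop body with the key expression rewritten to catOf
def bodyA (arr : PySem.Dict String (List String)) (c : List String) : PySem.Dict String (List String) :=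
  let arr := if arr.contains (catOf c) then arr else arr.insert (catOf c) []
  (PySem.List.pyRange 0 ((c.length : Int) - 1) 1).foldl
    (fun arr j => arr.modify (catOf c) [] (fun ls => ls ++ [PySem.List.pyGetD c j ""])) arr

theorem key_eq (c : List String) (h : c ≠ []) :
    PySem.List.pyGetD c ((c.length : Int) - 1) "" = catOf c := by
  have hl : 0 < c.length := List.length_pos_iff.mpr h
  rw [PySem.List.pyGetD_eq_getElem (i := (c.length : Int) - 1) c "" (by omega) (by omega)]
  have ht : ((c.length : Int) - 1).toNat = c.length - 1 := by omega
  simp [ht, catOf, List.getLast?_eq_getElem?, List.getElem?_eq_getElem (by omega : c.length - 1 < c.length)]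

theorem keyB_eq (c : List String) (h : c ≠ []) :
    PySem.List.pyGetD c (-1) "" = catOf c := by
  rw [PySem.List.pyGetD_neg_one (h := h)]
  simp [catOf, List.getLast?_eq_some_getLast h]

theorem bodyRawA_eq (arr : PySem.Dict String (List String)) (c : List String) (h : c ≠ []) :
    bodyRawA arr c = bodyA arr c := by
  unfold bodyRawA bodyA; rw [key_eq c h]

-- inner modify-loop: keys unchanged when the key is present
theorem inner_keys (js : List Int) (g : Int → String) (K : String)
    (d : PySem.Dict String (List String)) (h : d.contains K = true) :
    (js.foldl (fun d j => d.modify K [] (fun ls => ls ++ [g j])) d).keys = d.keys := by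
  induction js generalizing d with
  | nil => rfl
  | cons j js ih =>
      simp only [List.foldl_cons]
      rw [ih _ (by rw [PySem.Dict.contains_modify]; simp [h])]
      rw [PySem.Dict.keys_modify, PySem.Dict.keys_insert_of_contains]
      exact h

-- inner modify-loop: at the key, the stored list grows by one per step
theorem inner_len (js : List Int) (g : Int → String) (K k : String)
    (d : PySem.Dict String (List String)) :
    ((js.foldl (fun d j => d.modify K [] (fun ls => ls ++ [g j])) d).getD k []).length
      = (d.getD k []).length + (if k = K then js.length else 0) := by
  induction js generalizing d with
  | nil => simp
  | cons j js ih =>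
      simp only [List.foldl_cons]
      rw [ih]
      rw [PySem.Dict.getD_modify]
      by_cases hk : k = K <;> simp [hk] <;> omega

theorem bodyA_keys (d : PySem.Dict String (List String)) (c : List String) :
    (bodyA d c).keys = PySem.Set.add d.keys (catOf c) := by
  unfold bodyA
  by_cases h : d.contains (catOf c) = true
  · simp only [h, if_true]
    rw [inner_keys _ _ _ _ h]
    have hm : (catOf c) ∈ d.keys := (PySem.Dict.contains_iff_mem_keys d (catOf c)).mp h
    simp [PySem.Set.add, hm]
  · have h' : d.contains (catOf c) = false := by simpa using h
    simp only [h', Bool.false_eq_true, if_false]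
    rw [inner_keys _ _ _ _ (by simp [PySem.Dict.contains_insert_self])]
    rw [PySem.Dict.keys_insert_of_not_contains d [] h']
    have hm : (catOf c) ∉ d.keys := by
      intro hmem; rw [← PySem.Dict.contains_iff_mem_keys] at hmem; simp [h'] at hmem
    simp [PySem.Set.add, hm]

theorem bodyA_len (d : PySem.Dict String (List String)) (c : List String) (k : String) :
    ((bodyA d c).getD k []).length
      = (d.getD k []).length + (if catOf c = k then c.length - 1 else 0) := by
  unfold bodyA
  have hlen : (PySem.List.pyRange 0 ((c.length : Int) - 1) 1).length = c.length - 1 := by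
    rw [PySem.List.length_pyRange_one]; omega
  by_cases h : d.contains (catOf c) = true
  · simp only [h, if_true]
    rw [inner_len, hlen]
    by_cases hk : catOf c = k
    · simp [hk]
    · have hk' : ¬ k = catOf c := fun hh => hk hh.symm
      simp [hk, hk']
  · have h' : d.contains (catOf c) = false := by simpa using h
    simp only [h', Bool.false_eq_true, if_false]
    rw [inner_len, hlen, PySem.Dict.getD_insert]
    by_cases hk : k = catOf c
    · subst hk
      rw [PySem.Dict.getD_of_not_contains d [] h']
      simp
    · have hk' : ¬ catOf c = k := fun hh => hk hh.symm
      simp [hk, hk']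

theorem build_keys (l : List (List String)) (d : PySem.Dict String (List String)) :
    (l.foldl bodyA d).keys = PySem.Set.update d.keys (l.map catOf) := by
  induction l generalizing d with
  | nil => rfl
  | cons c l ih =>
      simp only [List.foldl_cons, List.map_cons]
      rw [ih, bodyA_keys]
      rfl

theorem build_len (l : List (List String)) (d : PySem.Dict String (List String)) (k : String) :
    ((l.foldl bodyA d).getD k []).length = (d.getD k []).length + catCount l k := by
  induction l generalizing d with
  | nil => simp [catCount]
  | cons c l ih =>
      simp only [List.foldl_cons]
      rw [ih, bodyA_len]
      simp [catCount]
      omega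

theorem sumB_eq (k : String) (l : List (List String)) (hpre : ∀ c ∈ l, c ≠ []) (s : Int) :
    l.foldl (fun s c => if catOf c = k then s + ((c.length : Int) - 1) else s) s
      = s + (catCount l k : Int) := by
  induction l generalizing s with
  | nil => simp [catCount]
  | cons c l ih =>
      have hc : c ≠ [] := hpre c (by simp)
      have hcl : 0 < c.length := List.length_pos_iff.mpr hc
      simp only [List.foldl_cons]
      rw [ih (fun x hx => hpre x (by simp [hx]))]
      have hcast : ((c.length - 1 : Nat) : Int) = (c.length : Int) - 1 := by omega
      by_cases hk : catOf c = k <;> simp [hk, catCount] <;> omega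

-- ===== VERDICT (by name: the statement is the Claim_ definition above) =====
theorem solution_spec : Claim_equal_solution := by
  intro clothes _ hpre
  unfold Spec_solution
  simp only [solution, solution_alt]
  rw [PySem.List.foldl_pyRange_zero_pyGetD' clothes [] bodyRawA PySem.Dict.empty]
  rw [PySem.List.foldl_congr_mem _ _ bodyA _ (fun arr c hc => bodyRawA_eq arr c (hpre c hc))]
  rw [PySem.List.foldl_congr_mem clothes
        (fun cats c => if cats.contains (PySem.List.pyGetD c (-1) "") then cats
                       else cats ++ [PySem.List.pyGetD c (-1) ""])
        (fun cats c => if cats.contains (catOf c) then cats else cats ++ [catOf c]) []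
        (fun cats c hc => by beta_reduce; rw [keyB_eq c (hpre c hc)])]
  rw [PySem.List.foldl_congr_mem _
        (fun answer cat => answer * (1 + clothes.foldl
          (fun s c => if PySem.List.pyGetD c (-1) "" = cat then s + ((c.length : Int) - 1) else s) 0))
        (fun answer cat => answer * (1 + clothes.foldl
          (fun s c => if catOf c = cat then s + ((c.length : Int) - 1) else s) 0)) 1
        (fun answer cat _ => by
          beta_reduce
          congr 2
          apply PySem.List.foldl_congr_mem
          intro s c hc
          beta_reduce
          rw [keyB_eq c (hpre c hc)])]
  have hkeys : (clothes.foldl bodyA PySem.Dict.empty).keys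
      = clothes.foldl (fun cats c => if cats.contains (catOf c) then cats else cats ++ [catOf c]) [] := by
    rw [build_keys, PySem.Dict.keys_empty, PySem.Set.update, List.foldl_map]
    rfl
  rw [hkeys]
  congr 1
  apply PySem.List.foldl_congr_mem
  intro a k _
  rw [build_len, sumB_eq k clothes hpre, PySem.Dict.getD_empty]
  simp only [List.length_nil]
  push_cast
  ring
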